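-- pv_equiv track=rewrite | github.com/aalto-trafficsense/regular-routes-server | pyfiles/common_helpers.py | dict_groups
-- ===== SOURCE A (Python) =====
-- def dict_groups(dicts, keys):
--     """Group consecutive dicts that are equal in given keys."""
--     gkey = None
--     group = []
--     for d in dicts:
--         dkey = dict((k, d[k]) for k in keys if k in d)
--         if dkey != gkey:
--             if gkey is not None:
--                 yield gkey, group
--             gkey = dkey
--             group = []
--         group.append(d)
--     if gkey is not None:
--         yield gkey, group
-- ===== SOURCE B (Python) =====
-- def dict_groups(dicts, keys):
--     """Group consecutive dicts that are equal in given keys."""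
--     groups = []
--     for d in reversed(dicts):
--         k = {kk: d[kk] for kk in keys if kk in d}
--         if groups and groups[0][0] == k:
--             groups[0] = (k, [d] + groups[0][1])
--         else:
--             groups.insert(0, (k, [d]))
--     yield from groups
-- ===== Notes on version B (the rewrite author's own statement) =====
-- stated objective: alternative
-- what changed: Builds the result back-to-front with a right-to-left pass over reversed(dicts), prepending each dict either into the front group or as a new front group, instead of A's forward state-machine with a pending gkey/group.
import Mathlib
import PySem

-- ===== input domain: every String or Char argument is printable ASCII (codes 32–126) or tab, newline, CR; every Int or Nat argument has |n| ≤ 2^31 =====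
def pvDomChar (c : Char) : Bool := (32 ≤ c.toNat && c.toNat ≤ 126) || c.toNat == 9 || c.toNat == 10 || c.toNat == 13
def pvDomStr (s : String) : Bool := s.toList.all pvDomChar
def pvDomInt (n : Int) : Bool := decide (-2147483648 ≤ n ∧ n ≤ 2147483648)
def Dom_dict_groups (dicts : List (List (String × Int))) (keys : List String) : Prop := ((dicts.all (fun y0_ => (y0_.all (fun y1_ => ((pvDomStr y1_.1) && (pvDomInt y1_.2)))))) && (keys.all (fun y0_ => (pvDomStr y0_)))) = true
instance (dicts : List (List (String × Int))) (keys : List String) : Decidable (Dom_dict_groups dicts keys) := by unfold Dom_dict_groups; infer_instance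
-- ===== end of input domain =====

-- B builds the result back-to-front over reversed(dicts), merging each dict into the front
-- group or opening a new front group, instead of A's forward gkey/group state machine
-- (objective: alternative; A is a generator, the equivalence is about the yielded sequence).

-- ===== PORT A =====
-- dkey = dict((k, d[k]) for k in keys if k in d), returned as its items list
-- (both ports build dkeys by the same scan of `keys`, so Python's order-insensitive dict ==
-- coincides with equality of these items lists)
def pvDkey (keys : List String) (d : List (String × Int)) : List (String × Int) :=
  (keys.foldl (fun acc k =>
      match (PySem.Dict.mk d).get? k with
      | some v => acc.insert k v
      | none => acc) PySem.Dict.empty).items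

-- the final `if gkey is not None: yield gkey, group`
def pvFinish (st : Option (List (String × Int)) × List (List (String × Int)) × List ((List (String × Int)) × (List (List (String × Int))))) : List ((List (String × Int)) × (List (List (String × Int)))) :=
  st.2.2 ++ (match st.1 with | some k => [(k, st.2.1)] | none => [])

def dict_groups (dicts : List (List (String × Int))) (keys : List String) : List ((List (String × Int)) × (List (List (String × Int)))) :=
  pvFinish (dicts.foldl (fun st d =>
    let dkey := pvDkey keys d
    if some dkey ≠ st.1 then
      (some dkey, [d], st.2.2 ++ (match st.1 with | some k => [(k, st.2.1)] | none => []))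
    else
      (st.1, st.2.1 ++ [d], st.2.2)) (none, [], []))

-- ===== PORT B =====
-- for d in reversed(dicts): merge into the front group if its key matches, else open a new
-- front group; the right-to-left pass is the fold over the reversed list (= List.foldr)
def dict_groups_alt (dicts : List (List (String × Int))) (keys : List String) : List ((List (String × Int)) × (List (List (String × Int)))) :=
  dicts.foldr (fun d groups =>
    let k := pvDkey keys d
    match groups with
    | (k', g) :: rest => if k' == k then (k, d :: g) :: rest else (k, [d]) :: (k', g) :: rest
    | [] => [(k, [d])]) []

-- ===== PRECONDITION & SPEC =====
def Spec_dict_groups (dicts : List (List (String × Int))) (keys : List String) (out : List ((List (String × Int)) × (List (List (String × Int))))) : Prop := out = dict_groups_alt dicts keys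
instance (dicts : List (List (String × Int))) (keys : List String) (out : List ((List (String × Int)) × (List (List (String × Int))))) : Decidable (Spec_dict_groups dicts keys out) := by unfold Spec_dict_groups; infer_instance

-- ===== CLAIM (what is proved, stated in full; the proofs are below) =====
def Claim_equal_dict_groups : Prop := ∀ (dicts : List (List (String × Int))) (keys : List String), Dom_dict_groups dicts keys → Spec_dict_groups dicts keys (dict_groups dicts keys)

-- ===== LEMMAS AND PROOFS =====

-- B's foldr satisfies the run characterization: head group = the maximal run of the head's key.
theorem pv_alt_cons (d : List (String × Int)) (rest : List (List (String × Int))) (keys : List String) :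
    dict_groups_alt (d :: rest) keys
    = (pvDkey keys d, d :: rest.takeWhile (fun d' => pvDkey keys d' == pvDkey keys d)) ::
        dict_groups_alt (rest.dropWhile (fun d' => pvDkey keys d' == pvDkey keys d)) keys := by
  induction rest generalizing d with
  | nil => simp [dict_groups_alt]
  | cons d' rest ih =>
    by_cases h : pvDkey keys d' = pvDkey keys d
    · have step : dict_groups_alt (d :: d' :: rest) keys
          = (fun d groups =>
              let k := pvDkey keys d
              match groups with
              | (k', g) :: rest => if k' == k then (k, d :: g) :: rest else (k, [d]) :: (k', g) :: rest
              | [] => [(k, [d])]) d (dict_groups_alt (d' :: rest) keys) := by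
        simp [dict_groups_alt]
      rw [step, ih d']
      simp [h]
    · have step : dict_groups_alt (d :: d' :: rest) keys
          = (fun d groups =>
              let k := pvDkey keys d
              match groups with
              | (k', g) :: rest => if k' == k then (k, d :: g) :: rest else (k, [d]) :: (k', g) :: rest
              | [] => [(k, [d])]) d (dict_groups_alt (d' :: rest) keys) := by
        simp [dict_groups_alt]
      rw [step, ih d']
      have hb : (pvDkey keys d' == pvDkey keys d) = false := by simp [h]
      simp only [List.takeWhile_cons, List.dropWhile_cons, hb, Bool.false_eq_true, if_false]
      simp [ih d']

-- Loop invariant for A's fold once a group is open: the finished fold equals the emitted prefix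
-- followed by the pending group completed by the run of equal keys, then B's grouping of the rest.
theorem pv_go_pending (keys : List String) (rest : List (List (String × Int)))
    (k : List (String × Int)) (g : List (List (String × Int)))
    (out : List ((List (String × Int)) × (List (List (String × Int))))) :
    pvFinish (rest.foldl (fun st d =>
      let dkey := pvDkey keys d
      if some dkey ≠ st.1 then
        (some dkey, [d], st.2.2 ++ (match st.1 with | some k => [(k, st.2.1)] | none => []))
      else
        (st.1, st.2.1 ++ [d], st.2.2)) (some k, g, out))
    = out ++ (k, g ++ rest.takeWhile (fun d' => pvDkey keys d' == k)) ::
        dict_groups_alt (rest.dropWhile (fun d' => pvDkey keys d' == k)) keys := by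
  induction rest generalizing k g out with
  | nil => simp [pvFinish, dict_groups_alt]
  | cons d rest ih =>
    by_cases h : pvDkey keys d = k
    · simp only [List.foldl_cons, h]
      have hne : ¬ (some k ≠ some k) := by simp
      simp only [if_neg hne]
      rw [ih]
      simp [h]
    · simp only [List.foldl_cons]
      have hne : some (pvDkey keys d) ≠ some k := by simpa using h
      simp only [if_pos hne]
      have hb : (pvDkey keys d == k) = false := by simp [h]
      rw [ih]
      simp only [List.takeWhile_cons, List.dropWhile_cons, hb, Bool.false_eq_true, if_false]
      rw [pv_alt_cons]
      simp

theorem pv_main (dicts : List (List (String × Int))) (keys : List String) :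
    dict_groups dicts keys = dict_groups_alt dicts keys := by
  cases dicts with
  | nil => rfl
  | cons d rest =>
    unfold dict_groups
    simp only [List.foldl_cons]
    have hne : some (pvDkey keys d) ≠ none := by simp
    simp only [if_pos hne]
    rw [pv_go_pending, pv_alt_cons]
    simp

-- ===== VERDICT (by name: the statement is the Claim_ definition above) =====
theorem dict_groups_spec : Claim_equal_dict_groups := by
  intro dicts keys _
  unfold Spec_dict_groups
  exact pv_main dicts keys
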